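-- pv_equiv track=rewrite | github.com/mbollmann/perceptron | bin/benchmark-pos.py | make_cv_splits
-- ===== SOURCE A (Python) =====
-- def make_cv_splits(sentences, gold_tags, folds):
--     split_sentences = []
--     split_gold_tags = []
--     start, stop = 0, 0
--     for i in range(folds):
--         stop = start + len(sentences[i::folds])
--         split_sentences.append(sentences[start:stop])
--         split_gold_tags.append(gold_tags[start:stop])
--         start = stop
--     for i in range(folds):
--         t_s = [e for (n, s) in enumerate(split_sentences) for e in s if n != i]
--         t_g = [e for (n, s) in enumerate(split_gold_tags) for e in s if n != i]
--         training_split = (t_s, t_g)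
--         eval_split = (split_sentences[i], split_gold_tags[i])
--         yield (training_split, eval_split)
-- ===== SOURCE B (Python) =====
-- def make_cv_splits(sentences, gold_tags, folds):
--     # same chunking loop as the original (chunk boundaries must match exactly)
--     split_sentences = []
--     split_gold_tags = []
--     start, stop = 0, 0
--     for i in range(folds):
--         stop = start + len(sentences[i::folds])
--         split_sentences.append(sentences[start:stop])
--         split_gold_tags.append(gold_tags[start:stop])
--         start = stop
--     # one forward pass: keep the concatenation of the chunks before (prefix)
--     # and after (suffix) the current fold; training = prefix + suffix
--     suf_s = [s for chunk in split_sentences for s in chunk]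
--     suf_g = [g for chunk in split_gold_tags for g in chunk]
--     pre_s, pre_g = [], []
--     for cs, cg in zip(split_sentences, split_gold_tags):
--         suf_s = suf_s[len(cs):]
--         suf_g = suf_g[len(cg):]
--         yield ((pre_s + suf_s, pre_g + suf_g), (cs, cg))
--         pre_s = pre_s + cs
--         pre_g = pre_g + cg
-- ===== Notes on version B (the rewrite author's own statement) =====
-- stated objective: alternative
-- what changed: A rebuilds each fold's training set by rescanning and filtering all chunks with an enumerate-comprehension per fold; B keeps the identical chunking loop but produces all folds in one forward pass that maintains the prefix concatenation (chunks already passed) and suffix concatenation (chunks still ahead), yielding prefix+suffix as the training set.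
import Mathlib
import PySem

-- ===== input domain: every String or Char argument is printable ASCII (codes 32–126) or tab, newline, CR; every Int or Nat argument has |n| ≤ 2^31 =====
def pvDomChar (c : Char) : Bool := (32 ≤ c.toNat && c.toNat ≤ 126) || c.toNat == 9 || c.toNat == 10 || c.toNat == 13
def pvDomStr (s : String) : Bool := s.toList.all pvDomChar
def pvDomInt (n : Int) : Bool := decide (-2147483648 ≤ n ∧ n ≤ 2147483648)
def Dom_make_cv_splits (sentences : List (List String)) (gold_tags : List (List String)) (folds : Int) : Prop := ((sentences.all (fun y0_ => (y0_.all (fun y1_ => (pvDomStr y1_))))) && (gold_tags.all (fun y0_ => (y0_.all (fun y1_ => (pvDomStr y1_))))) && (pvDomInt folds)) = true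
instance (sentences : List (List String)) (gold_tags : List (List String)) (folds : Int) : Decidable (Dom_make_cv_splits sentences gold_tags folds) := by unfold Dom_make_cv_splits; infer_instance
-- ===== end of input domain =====

-- B replaces A's per-fold filtered rescan of all chunks by a single forward pass maintaining
-- prefix/suffix concatenations (objective: alternative decomposition, same asymptotic cost).
-- Both Pythons are generators; the equivalence is about the list of yielded values.

-- ===== PORT A =====
-- The chunking loop is VERBATIM identical Python in A and in B, so it is factored out here
-- and used by both ports.  State = (split_sentences, split_gold_tags, start).
def cvChunkStep (sentences gold_tags : List (List String)) (folds : Int)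
    (acc : List (List (List String)) × List (List (List String)) × Int) (i : Int) :
    List (List (List String)) × List (List (List String)) × Int :=
  let start := acc.2.2
  -- len(sentences[i::folds]); folds ≠ 0 whenever the loop body runs, so the getD [] never fires
  let stop := start + (((PySem.List.slice? sentences (some i) none folds).getD []).length : Int)
  (acc.1 ++ [PySem.List.slice sentences (some start) (some stop)],
   acc.2.1 ++ [PySem.List.slice gold_tags (some start) (some stop)],
   stop)

def cvChunks (sentences gold_tags : List (List String)) (folds : Int) :
    List (List (List String)) × List (List (List String)) × Int :=
  (PySem.List.pyRange 0 folds 1).foldl (cvChunkStep sentences gold_tags folds) ([], [], 0)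

def make_cv_splits (sentences : List (List String)) (gold_tags : List (List String)) (folds : Int) : List ((List (List String) × List (List String)) × (List (List String) × List (List String))) :=
  let st := cvChunks sentences gold_tags folds
  let split_sentences := st.1
  let split_gold_tags := st.2.1
  -- second loop: one yield per i in range(folds)
  (PySem.List.pyRange 0 folds 1).map (fun i =>
    let t_s := (PySem.List.enumerate split_sentences 0).flatMap
      (fun ns => if ns.1 ≠ i then ns.2 else [])
    let t_g := (PySem.List.enumerate split_gold_tags 0).flatMap
      (fun ns => if ns.1 ≠ i then ns.2 else [])
    -- split_sentences[i]: 0 ≤ i < folds = length, always in range, so pyGetD is exact here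
    ((t_s, t_g), (PySem.List.pyGetD split_sentences i [], PySem.List.pyGetD split_gold_tags i [])))

-- ===== PORT B =====
-- body of B's forward pass; state = (out, pre_s, pre_g, suf_s, suf_g)
def cvPassStep
    (acc : List ((List (List String) × List (List String)) × (List (List String) × List (List String)))
         × List (List String) × List (List String) × List (List String) × List (List String))
    (cd : List (List String) × List (List String)) :
    List ((List (List String) × List (List String)) × (List (List String) × List (List String)))
         × List (List String) × List (List String) × List (List String) × List (List String) :=
  match acc, cd with
  | (out, pre_s, pre_g, suf_s, suf_g), (cs, cg) =>
    let suf_s' := PySem.List.slice suf_s (some (cs.length : Int)) none   -- suf_s[len(cs):]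
    let suf_g' := PySem.List.slice suf_g (some (cg.length : Int)) none   -- suf_g[len(cg):]
    (out ++ [((pre_s ++ suf_s', pre_g ++ suf_g'), (cs, cg))],
     pre_s ++ cs, pre_g ++ cg, suf_s', suf_g')
def make_cv_splits_alt (sentences : List (List String)) (gold_tags : List (List String)) (folds : Int) : List ((List (List String) × List (List String)) × (List (List String) × List (List String))) :=
  let st := cvChunks sentences gold_tags folds
  let split_sentences := st.1
  let split_gold_tags := st.2.1
  -- suf_s / suf_g start as the concatenation of all chunks, pre_s / pre_g as [];
  -- one forward pass over zip(split_sentences, split_gold_tags) peels each chunk off the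
  -- suffix before yielding and appends it to the prefix after yielding
  let r := (split_sentences.zip split_gold_tags).foldl cvPassStep
    ([], [], [],
     split_sentences.flatMap (fun chunk => chunk),
     split_gold_tags.flatMap (fun chunk => chunk))
  r.1

-- ===== PRECONDITION & SPEC =====
def Spec_make_cv_splits (sentences : List (List String)) (gold_tags : List (List String)) (folds : Int) (out : List ((List (List String) × List (List String)) × (List (List String) × List (List String)))) : Prop := out = make_cv_splits_alt sentences gold_tags folds
instance (sentences : List (List String)) (gold_tags : List (List String)) (folds : Int) (out : List ((List (List String) × List (List String)) × (List (List String) × List (List String)))) : Decidable (Spec_make_cv_splits sentences gold_tags folds out) := by unfold Spec_make_cv_splits; infer_instance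

-- ===== CLAIM (what is proved, stated in full; the proofs are below) =====
def Claim_equal_make_cv_splits : Prop := ∀ (sentences : List (List String)) (gold_tags : List (List String)) (folds : Int), Dom_make_cv_splits sentences gold_tags folds → Spec_make_cv_splits sentences gold_tags folds (make_cv_splits sentences gold_tags folds)

-- ===== LEMMAS AND PROOFS =====

-- the chunking loop appends exactly one chunk to each list per range element
theorem cvChunks_lengths (sentences gold_tags : List (List String)) (folds : Int)
    (l : List Int) (ss sg : List (List (List String))) (st : Int) :
    (l.foldl (cvChunkStep sentences gold_tags folds) (ss, sg, st)).1.length = ss.length + l.length ∧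
    (l.foldl (cvChunkStep sentences gold_tags folds) (ss, sg, st)).2.1.length = sg.length + l.length := by
  induction l generalizing ss sg st with
  | nil => simp
  | cons i l ih =>
      simp only [List.foldl_cons, cvChunkStep]
      obtain ⟨h1, h2⟩ := ih (ss ++ [_]) (sg ++ [_]) _
      refine ⟨h1.trans ?_, h2.trans ?_⟩ <;> simp <;> omega

-- all chunk indices are ≥ s > i, so the filter keeps everything
theorem enumFilter_all {α : Type} (ss : List (List α)) (s i : Int) (h : i < s) :
    (PySem.List.enumerate ss s).flatMap (fun ns => if ns.1 ≠ i then ns.2 else []) = ss.flatten := by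
  induction ss generalizing s with
  | nil => simp [PySem.List.enumerate_nil]
  | cons c rest ih =>
      rw [PySem.List.enumerate_cons]
      simp only [List.flatMap_cons, List.flatten_cons]
      rw [if_pos (by omega), ih (s + 1) (by omega)]

-- A's comprehension [e for (n,s) in enumerate(chunks, s) for e in s if n != s+k]
-- is the prefix (chunks before index k) followed by the suffix (chunks after index k)
theorem enumFilter {α : Type} (ss : List (List α)) (s : Int) (k : Nat) :
    (PySem.List.enumerate ss s).flatMap (fun ns => if ns.1 ≠ s + (k : Int) then ns.2 else []) =
      (ss.take k).flatten ++ (ss.drop (k + 1)).flatten := by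
  induction ss generalizing s k with
  | nil => simp [PySem.List.enumerate_nil]
  | cons c rest ih =>
      rw [PySem.List.enumerate_cons]
      simp only [List.flatMap_cons]
      cases k with
      | zero =>
          rw [if_neg (by simp), enumFilter_all rest (s + 1) (s + ((0 : Nat) : Int)) (by simp)]
          simp
      | succ k =>
          rw [if_pos (by intro he; omega)]
          have hs : s + ((k + 1 : Nat) : Int) = (s + 1) + (k : Int) := by push_cast; ring
          rw [hs, ih (s + 1) k]
          simp [List.append_assoc]

-- invariant of B's forward pass: given the suffix concatenation of the remaining chunks,
-- the pass emits, for each index k, prefix ++ (flatten of chunks before k) ++ (after k)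
theorem bLoop (ss sg : List (List (List String))) (h : ss.length = sg.length)
    (out : List ((List (List String) × List (List String)) × (List (List String) × List (List String))))
    (ps pg : List (List String)) :
    (ss.zip sg).foldl cvPassStep (out, ps, pg, ss.flatten, sg.flatten) =
    (out ++ (List.range ss.length).map (fun k =>
        ((ps ++ (ss.take k).flatten ++ (ss.drop (k + 1)).flatten,
          pg ++ (sg.take k).flatten ++ (sg.drop (k + 1)).flatten),
         (ss.getD k [], sg.getD k []))),
     ps ++ ss.flatten, pg ++ sg.flatten, [], []) := by
  induction ss generalizing sg out ps pg with
  | nil =>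
      cases sg with
      | nil => simp
      | cons d sg' => simp at h
  | cons c ss' ih =>
      cases sg with
      | nil => simp at h
      | cons d sg' =>
          simp only [List.length_cons, Nat.add_left_inj] at h
          rw [List.zip_cons_cons, List.foldl_cons]
          have hb : cvPassStep (out, ps, pg, (c :: ss').flatten, (d :: sg').flatten) (c, d) =
              (out ++ [((ps ++ ss'.flatten, pg ++ sg'.flatten), (c, d))],
               ps ++ c, pg ++ d, ss'.flatten, sg'.flatten) := by
            simp [cvPassStep, PySem.List.slice_from_natCast, List.flatten_cons]
          rw [hb, ih sg' h]
          simp only [List.range_succ_eq_map, List.map_cons, List.map_map, List.length_cons,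
            List.take_zero, List.flatten_nil, List.drop_succ_cons, List.drop_zero,
            List.getD_cons_zero, List.append_nil, List.flatten_cons, Prod.mk.injEq]
          refine ⟨?_, by simp [List.append_assoc], by simp [List.append_assoc], trivial⟩
          rw [List.append_assoc, List.singleton_append]
          congr 1
          congr 1
          apply List.map_congr_left
          intro k _
          simp [Function.comp, List.take_succ_cons, List.flatten_cons, List.append_assoc]

-- ===== VERDICT (by name: the statement is the Claim_ definition above) =====
theorem make_cv_splits_spec : Claim_equal_make_cv_splits := by
  intro sentences gold_tags folds _
  show make_cv_splits sentences gold_tags folds = make_cv_splits_alt sentences gold_tags folds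
  unfold make_cv_splits make_cv_splits_alt
  obtain ⟨h1, h2⟩ := cvChunks_lengths sentences gold_tags folds (PySem.List.pyRange 0 folds 1) [] [] 0
  set st := cvChunks sentences gold_tags folds with hst
  have h1' : st.1.length = (PySem.List.pyRange 0 folds 1).length := by
    rw [hst, cvChunks]; simpa using h1
  have h2' : st.2.1.length = (PySem.List.pyRange 0 folds 1).length := by
    rw [hst, cvChunks]; simpa using h2
  have hlen : st.1.length = st.2.1.length := h1'.trans h2'.symm
  simp only [List.flatMap_id']
  rw [bLoop st.1 st.2.1 hlen [] [] []]
  have hn : st.1.length = (folds - 0).toNat := by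
    rw [h1', PySem.List.length_pyRange_one]
  rw [PySem.List.pyRange_one, List.map_map, hn]
  simp only [List.nil_append]
  apply List.map_congr_left
  intro k _
  have e1 := enumFilter st.1 0 k
  have e2 := enumFilter st.2.1 0 k
  simp only [zero_add] at e1 e2
  simp only [Function.comp, zero_add, e1, e2, PySem.List.pyGetD_natCast]
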